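-- pv_equiv track=rewrite | github.com/rhasanrakib/common-functions-ml | common.py | calculate_min_sample
-- ===== SOURCE A (Python) =====
-- def calculate_min_sample(label):
--     uniq_label = {}
--     for i in label:
--         if i in uniq_label:
--             uniq_label[i] += 1
--         else:
--             uniq_label[i] = 1
--     min_num_of_sample = 9999999
--     for key, val in uniq_label.items():
--         if val <= min_num_of_sample:
--             min_num_of_sample = val
--     return min_num_of_sample
-- ===== SOURCE B (Python) =====
-- def calculate_min_sample(label):
--     best = 9999999
--     run = 0
--     prev = None
--     for v in sorted(label):
--         if run > 0 and v == prev: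
--             run += 1
--         else:
--             if 0 < run < best:
--                 best = run
--             run = 1
--             prev = v
--     if 0 < run < best:
--         best = run
--     return best
-- ===== Notes on version B (the rewrite author's own statement) =====
-- stated objective: alternative
-- what changed: Replaces A's build-a-frequency-dict-then-scan-its-items approach with sort-then-scan: sort the labels so equal values become adjacent runs, then one linear pass over the sorted list tracks the current run length and keeps the minimum finished run; no dict or frequency table is built.
import Mathlib
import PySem

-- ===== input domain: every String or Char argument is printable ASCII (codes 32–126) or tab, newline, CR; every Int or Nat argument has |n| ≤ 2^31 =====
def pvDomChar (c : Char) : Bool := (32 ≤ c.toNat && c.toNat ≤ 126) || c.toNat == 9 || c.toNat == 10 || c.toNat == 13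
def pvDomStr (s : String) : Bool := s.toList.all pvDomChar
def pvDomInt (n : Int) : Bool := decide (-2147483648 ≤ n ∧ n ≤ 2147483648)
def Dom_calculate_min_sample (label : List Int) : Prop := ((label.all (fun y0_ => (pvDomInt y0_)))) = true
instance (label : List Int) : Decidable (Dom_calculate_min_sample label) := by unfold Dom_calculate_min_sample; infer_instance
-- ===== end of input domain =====

-- Header: B replaces A's frequency-dict pass with sort-then-scan over runs of equal values (alternative decomposition, same results).
-- ===== PORT A =====
def calculate_min_sample (label : List Int) : Int :=
  (label.foldl (fun d i =>
    if d.contains i then d.insert i (d.getD i 0 + 1) else d.insert i 1)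
    PySem.Dict.empty).items.foldl (fun m kv => if kv.2 ≤ m then kv.2 else m) 9999999

-- ===== PORT B =====
-- state (best, run, prev) of Source B's loop; one step of the 'for v in sorted(label)' body
def pvStep (st : Int × Int × Option Int) (v : Int) : Int × Int × Option Int :=
  if 0 < st.2.1 ∧ st.2.2 = some v then (st.1, st.2.1 + 1, st.2.2)
  else ((if 0 < st.2.1 ∧ st.2.1 < st.1 then st.2.1 else st.1), 1, some v)

-- the final 'if 0 < run < best' flush after the loop
def pvFlush (st : Int × Int × Option Int) : Int :=
  if 0 < st.2.1 ∧ st.2.1 < st.1 then st.2.1 else st.1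

def calculate_min_sample_alt (label : List Int) : Int :=
  pvFlush ((PySem.List.sorted label (fun x => x) false).foldl pvStep (9999999, 0, none))

-- ===== PRECONDITION & SPEC =====
def Spec_calculate_min_sample (label : List Int) (out : Int) : Prop := out = calculate_min_sample_alt label
instance (label : List Int) (out : Int) : Decidable (Spec_calculate_min_sample label out) := by unfold Spec_calculate_min_sample; infer_instance

-- ===== CLAIM (what is proved, stated in full; the proofs are below) =====
def Claim_equal_calculate_min_sample : Prop := ∀ (label : List Int), Dom_calculate_min_sample label → Spec_calculate_min_sample label (calculate_min_sample label)

-- ===== LEMMAS AND PROOFS =====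

-- A's first loop builds exactly Counter(label)
lemma dict_eq_counter (label : List Int) :
    label.foldl (fun d i =>
      if d.contains i then d.insert i (d.getD i 0 + 1) else d.insert i 1) PySem.Dict.empty
      = PySem.Dict.counter label := by
  rw [PySem.List.foldl_congr_mem (g := fun d i => d.insert i (d.getD i 0 + 1))]
  · exact PySem.Dict.foldl_insert_getD_add_one_eq_counter label
  · intro d x _
    by_cases h : d.contains x = true
    · simp [h]
    · simp only [Bool.not_eq_true] at h
      simp [h, PySem.Dict.getD_of_not_contains (h := h)]

-- folding (min ∘ c) is invariant under permutation of the element list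
lemma foldl_min_perm (c : Int → Int) {l1 l2 : List Int} (h : l1.Perm l2) :
    ∀ b : Int, l1.foldl (fun m x => min (c x) m) b = l2.foldl (fun m x => min (c x) m) b := by
  induction h with
  | nil => intro b; rfl
  | cons x _ ih => intro b; simpa using ih _
  | swap x y l =>
      intro b
      simp only [List.foldl_cons]
      rw [min_left_comm]
  | trans _ _ ih1 ih2 => intro b; rw [ih1, ih2]

-- a step whose run-continuation test fails flushes and starts a fresh run
lemma pvStep_fresh (st : Int × Int × Option Int) (v : Int) (h : ¬ (0 < st.2.1 ∧ st.2.2 = some v)) :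
    pvStep st v = (pvFlush st, 1, some v) := by
  simp [pvStep, pvFlush, h]

-- a run of k equal values is absorbed into the run counter
lemma pvStep_absorb (x b : Int) : ∀ (k : Nat) (j : Int), 0 < j →
    (List.replicate k x).foldl pvStep (b, j, some x) = (b, j + (k : Int), some x) := by
  intro k
  induction k with
  | zero => intro j _; simp
  | succ k ih =>
      intro j hj
      rw [List.replicate_succ, List.foldl_cons]
      have hstep : pvStep (b, j, some x) x = (b, j + 1, some x) := by
        simp [pvStep, hj]
      rw [hstep, ih (j + 1) (by omega)]
      have : j + 1 + (k : Int) = j + ((k + 1 : Nat) : Int) := by push_cast; ring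
      rw [this]

-- in an ascending list, all copies of the head form a prefix run
lemma run_split (x : Int) : ∀ (t : List Int), (x :: t).Pairwise (· ≤ ·) →
    ∃ r', x :: t = List.replicate ((x :: t).count x) x ++ r' ∧ x ∉ r' ∧ r'.Pairwise (· ≤ ·) := by
  intro t
  induction t generalizing x with
  | nil => intro _; exact ⟨[], by simp, by simp⟩
  | cons y t2 ih =>
      intro hpw
      by_cases hxy : y = x
      · subst hxy
        obtain ⟨r', heq, hmem, hpw'⟩ := ih y hpw.of_cons
        refine ⟨r', ?_, hmem, hpw'⟩
        have hcnt : (y :: y :: t2).count y = (y :: t2).count y + 1 := by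
          simp
        rw [hcnt, List.replicate_succ, List.cons_append, ← heq]
      · have hxt : x ∉ y :: t2 := by
          intro hmem
          rcases List.mem_cons.mp hmem with h1 | h2
          · exact hxy h1.symm
          · have hxy' : x ≤ y := (List.pairwise_cons.mp hpw).1 y (by simp)
            have hyx : y ≤ x := (List.pairwise_cons.mp hpw.of_cons).1 x h2
            exact hxy (le_antisymm hyx hxy')
        have hcnt : (x :: y :: t2).count x = 1 := by
          simp [List.count_eq_zero_of_not_mem (by
            intro h; exact hxt (List.mem_cons_of_mem _ h)), hxy]
        refine ⟨y :: t2, ?_, hxt, hpw.of_cons⟩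
        rw [hcnt]
        simp
-- 'x ∉ t2' above: a later copy of x would be ≥ y and ≤ y, forcing y = x

-- distinct elements of a leading run followed by the rest
lemma ofList_run_perm (y : Int) (k : Nat) (r' : List Int) (hk : 0 < k) (hy : y ∉ r') :
    (PySem.Set.ofList (List.replicate k y ++ r')).Perm (y :: PySem.Set.ofList r') := by
  rw [List.perm_ext_iff_of_nodup (PySem.Set.nodup_ofList _)]
  · intro a
    simp only [PySem.Set.mem_ofList, List.mem_append, List.mem_replicate, List.mem_cons]
    constructor
    · rintro (⟨_, rfl⟩ | h)
      · exact Or.inl rfl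
      · exact Or.inr h
    · rintro (rfl | h)
      · exact Or.inl ⟨by omega, rfl⟩
      · exact Or.inr h
  · refine List.nodup_cons.mpr ⟨?_, PySem.Set.nodup_ofList _⟩
    simpa [PySem.Set.mem_ofList] using hy

-- invariant of B's run scan: on an ascending list it computes the min over distinct values of their counts
lemma scan_eq (n : Nat) : ∀ (s : List Int), s.length ≤ n → s.Pairwise (· ≤ ·) →
    ∀ (st : Int × Int × Option Int), (∀ v ∈ s, pvStep st v = (pvFlush st, 1, some v)) →
    pvFlush (s.foldl pvStep st)
      = (PySem.Set.ofList s).foldl (fun m y => min ((s.count y : Nat) : Int) m) (pvFlush st) := by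
  induction n with
  | zero =>
    intro s h _ st _
    have : s = [] := List.eq_nil_of_length_eq_zero (Nat.le_zero.mp h)
    subst this; rfl
  | succ n ih =>
    intro s h hpw st hst
    match s with
    | [] => rfl
    | x :: t =>
      obtain ⟨r', heq, hxr, hpw'⟩ := run_split x t hpw
      have hk : 0 < (x :: t).count x := List.count_pos_iff.mpr (by simp)
      obtain ⟨k', hk1⟩ : ∃ k', (x :: t).count x = k' + 1 := ⟨(x :: t).count x - 1, by omega⟩
      rw [hk1] at heq
      -- split off the leading run
      have hfold1 : (x :: t).foldl pvStep st = r'.foldl pvStep (pvFlush st, 1 + (k' : Int), some x) := by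
        conv_lhs => rw [heq]
        rw [List.foldl_append, List.replicate_succ, List.foldl_cons,
            hst x (by simp), pvStep_absorb x (pvFlush st) k' 1 (by omega)]
      have hlen : r'.length ≤ n := by
        have := congrArg List.length heq
        simp only [List.length_cons, List.length_append, List.length_replicate] at this
        simp only [List.length_cons] at h
        omega
      have hst' : ∀ v ∈ r', pvStep (pvFlush st, 1 + (k' : Int), some x) v
          = (pvFlush (pvFlush st, 1 + (k' : Int), some x), 1, some v) := by
        intro v hv
        apply pvStep_fresh
        simp only [not_and]
        intro _
        simp only [Option.some.injEq]
        intro hxv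
        exact hxr (hxv ▸ hv)
      have hflush' : pvFlush (pvFlush st, 1 + (k' : Int), some x)
          = min (((k' + 1 : Nat)) : Int) (pvFlush st) := by
        simp only [pvFlush, min_def]
        push_cast
        split_ifs <;> omega
      -- left side: scan the run, then recurse on the remainder
      rw [hfold1, ih r' hlen hpw' _ hst', hflush']
      -- right side: peel the head off the distinct-element fold
      have hperm2 : (PySem.Set.ofList (x :: t)).Perm (x :: PySem.Set.ofList r') := by
        rw [heq]
        exact ofList_run_perm x (k' + 1) r' (by omega) hxr
      rw [foldl_min_perm (fun y => (((x :: t).count y : Nat) : Int)) hperm2, List.foldl_cons, hk1]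
      -- counts agree between s and its tail r' on the surviving values
      apply PySem.List.foldl_congr_mem
      intro m y hy
      have hyx : y ≠ x := by
        intro hyx
        exact hxr (hyx ▸ (PySem.Set.mem_ofList _ _).mp hy)
      have : (x :: t).count y = r'.count y := by
        rw [heq, List.count_append, List.count_replicate]
        simp [Ne.symm hyx]
      rw [this]

theorem calculate_min_sample_spec : Claim_equal_calculate_min_sample := by
  intro label _
  unfold Spec_calculate_min_sample calculate_min_sample calculate_min_sample_alt
  set s := PySem.List.sorted label (fun x => x) false with hs
  have hperm : s.Perm label := PySem.List.sorted_perm label (fun x => x) false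
  -- A's value: min over the distinct labels of their counts
  rw [dict_eq_counter, PySem.Dict.items_counter, List.foldl_map]
  have hA : (PySem.Set.ofList label).foldl
        (fun m k => if ((label.count k : Nat) : Int) ≤ m then ((label.count k : Nat) : Int) else m) 9999999
      = (PySem.Set.ofList s).foldl (fun m y => min ((s.count y : Nat) : Int) m) 9999999 := by
    have h1 : (PySem.Set.ofList label).foldl
          (fun m k => if ((label.count k : Nat) : Int) ≤ m then ((label.count k : Nat) : Int) else m) 9999999
        = (PySem.Set.ofList label).foldl (fun m y => min ((label.count y : Nat) : Int) m) 9999999 := by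
      apply PySem.List.foldl_congr_mem
      intro m y _
      rw [min_def]
    have hsetperm : (PySem.Set.ofList label).Perm (PySem.Set.ofList s) := by
      rw [List.perm_ext_iff_of_nodup (PySem.Set.nodup_ofList _) (PySem.Set.nodup_ofList _)]
      intro a
      simp only [PySem.Set.mem_ofList]
      exact ⟨fun ha => hperm.mem_iff.mpr ha, fun ha => hperm.mem_iff.mp ha⟩
    rw [h1, foldl_min_perm (fun y => ((label.count y : Nat) : Int)) hsetperm]
    apply PySem.List.foldl_congr_mem
    intro m y _
    rw [hperm.count_eq]
  rw [hA]
  -- B's value: the run scan over the sorted list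
  have hpw : s.Pairwise (· ≤ ·) := by
    simpa using PySem.List.sorted_pairwise label (fun x => x)
  have hst : ∀ v ∈ s, pvStep (9999999, 0, (none : Option Int)) v
      = (pvFlush (9999999, 0, none), 1, some v) := by
    intro v _
    apply pvStep_fresh
    simp
  rw [scan_eq s.length s (le_refl _) hpw _ hst]
  rfl
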